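-- pv_equiv track=rewrite | github.com/junhuijh/ftree-vis | Assignment1.py | previous_label
-- ===== SOURCE A (Python) =====
-- def previous_label(s):
--     s = list(s)
--     i = len(s) - 1
--     while i >= 0:
--         if s[i] != 'A':
--             s[i] = chr(ord(s[i]) - 1)
--             return ''.join(s)
--         s[i] = 'Z'
--         i -= 1
--     return None
-- ===== SOURCE B (Python) =====
-- def previous_label(s):
--     # Single forward pass: track the index of the last character that is not 'A'
--     # (the borrow boundary), then assemble the result in one step.
--     last = -1
--     for i, c in enumerate(s):
--         if c != 'A':
--             last = i
--     if last < 0: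
--         return None
--     return s[:last] + chr(ord(s[last]) - 1) + 'Z' * (len(s) - last - 1)
-- ===== Notes on version B (the rewrite author's own statement) =====
-- stated objective: alternative
-- what changed: A scans right-to-left mutating a char list and returning mid-loop; B makes one forward pass with an accumulator to find the last non-'A' index (the borrow boundary) and then assembles prefix + decremented char + run of 'Z's directly.
import Mathlib
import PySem

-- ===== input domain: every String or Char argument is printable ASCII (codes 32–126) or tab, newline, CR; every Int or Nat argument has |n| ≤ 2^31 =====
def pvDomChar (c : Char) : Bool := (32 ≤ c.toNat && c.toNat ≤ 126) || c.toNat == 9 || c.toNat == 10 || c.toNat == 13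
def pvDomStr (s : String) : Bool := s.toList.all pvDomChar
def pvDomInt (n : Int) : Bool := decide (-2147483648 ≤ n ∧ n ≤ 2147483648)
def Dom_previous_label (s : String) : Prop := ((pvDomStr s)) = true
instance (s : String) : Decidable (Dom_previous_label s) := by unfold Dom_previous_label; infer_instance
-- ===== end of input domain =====

-- B replaces A's right-to-left mutating scan by a single forward pass that tracks the last
-- non-'A' index (the borrow boundary) and then assembles the result directly: alternative.

-- ===== PORT A =====
-- A's while loop over index i (from len-1 down to 0), mutating the char list; the Nat
-- argument n stands for i+1, so n = 0 is the loop exit (i = -1) returning None.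
def pvLoopA (s : List Char) : Nat → Option (List Char)
  | 0 => none
  | n + 1 =>
    match s[n]? with
    | none => none   -- unreachable: n < s.length throughout
    | some c =>
      if c ≠ 'A' then some (s.set n (Char.ofNat (c.toNat - 1)))
      else pvLoopA (s.set n 'Z') n

def previous_label (s : String) : Option String :=
  (pvLoopA s.toList s.toList.length).map String.ofList

-- ===== PORT B =====
-- Source B at the List Char level: the for-loop over enumerate(s) is the foldl over
-- PySem.List.enumerate updating the accumulator `last`; s[:last] with 0 ≤ last ≤ len is
-- exactly `take last.toNat`, s[last] with 0 ≤ last < len is exactly `getD last.toNat`.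
def pvLastB (t : List Char) : Int :=
  (PySem.List.enumerate t).foldl (fun last p => if p.2 ≠ 'A' then p.1 else last) (-1)

def pvAltL (t : List Char) : Option (List Char) :=
  let last := pvLastB t
  if last < 0 then none
  else some (t.take last.toNat ++ [Char.ofNat ((t.getD last.toNat 'A').toNat - 1)]
        ++ List.replicate (t.length - last.toNat - 1) 'Z')

def previous_label_alt (s : String) : Option String :=
  (pvAltL s.toList).map String.ofList

-- ===== PRECONDITION & SPEC =====
def Spec_previous_label (s : String) (out : Option String) : Prop := out = previous_label_alt s
instance (s : String) (out : Option String) : Decidable (Spec_previous_label s out) := by unfold Spec_previous_label; infer_instance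

-- ===== CLAIM (what is proved, stated in full; the proofs are below) =====
def Claim_equal_previous_label : Prop := ∀ (s : String), Dom_previous_label s → Spec_previous_label s (previous_label s)

-- ===== LEMMAS AND PROOFS =====

-- B's accumulator after appending one char: new last index if c ≠ 'A', otherwise unchanged.
theorem pvLastB_append (l : List Char) (c : Char) :
    pvLastB (l ++ [c]) = if c ≠ 'A' then (l.length : Int) else pvLastB l := by
  unfold pvLastB
  rw [PySem.List.enumerate_append, List.foldl_append]
  simp [PySem.List.enumerate]

theorem pvLastB_lt (l : List Char) : pvLastB l < l.length := by
  induction l using List.reverseRecOn with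
  | nil => simp [pvLastB, PySem.List.enumerate]
  | append_singleton l c ih =>
    rw [pvLastB_append]
    by_cases h : c = 'A'
    · simp [h]; omega
    · simp [h]

-- A's loop never touches indices ≥ n, so a fixed tail rides along untouched.
theorem pvLoopA_append (n : Nat) : ∀ (l tail : List Char), n ≤ l.length →
    pvLoopA (l ++ tail) n = (pvLoopA l n).map (· ++ tail) := by
  induction n with
  | zero => intro l tail _; simp [pvLoopA]
  | succ n ih =>
    intro l tail h
    have hn : n < l.length := by omega
    rw [pvLoopA, pvLoopA, List.getElem?_append_left hn]
    cases hc : l[n]? with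
    | none => simp at hc; omega
    | some c =>
      dsimp only
      by_cases hA : c = 'A'
      · subst hA
        rw [if_neg (by decide), if_neg (by decide), List.set_append_left n 'Z' hn,
          ih (l.set n 'Z') tail (by simpa using hn.le)]
      · simp only [if_pos hA, List.set_append_left n _ hn, Option.map_some]

theorem pvLoopA_eq_altL : ∀ (t : List Char), pvLoopA t t.length = pvAltL t := by
  intro t
  induction t using List.reverseRecOn with
  | nil => rfl
  | append_singleton l c ih =>
    by_cases hA : c = 'A'
    · subst hA
      have hstep : pvLoopA (l ++ ['A']) (l ++ ['A']).length
          = (pvLoopA l l.length).map (· ++ ['Z']) := by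
        rw [show (l ++ ['A']).length = l.length + 1 by simp, pvLoopA,
          List.getElem?_concat_length]
        dsimp only
        rw [if_neg (by decide)]
        have : (l ++ ['A']).set l.length 'Z' = l ++ ['Z'] := by
          rw [List.set_append_right _ _ (le_refl _)]
          simp
        rw [this, pvLoopA_append l.length l ['Z'] (le_refl _)]
      rw [hstep, ih]
      -- show pvAltL (l ++ ['A']) = (pvAltL l).map (· ++ ['Z'])
      have hlastA : pvLastB (l ++ ['A']) = pvLastB l := by
        rw [pvLastB_append]; simp
      unfold pvAltL
      dsimp only
      rw [hlastA]
      by_cases hneg : pvLastB l < 0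
      · simp [hneg]
      · rw [if_neg hneg, if_neg hneg, Option.map_some]
        have hlt : pvLastB l < l.length := pvLastB_lt l
        have hlt' : (pvLastB l).toNat < l.length := by omega
        congr 1
        rw [List.take_append_of_le_length hlt'.le,
          List.getD_append _ _ _ _ hlt',
          show (l ++ ['A']).length - (pvLastB l).toNat - 1
            = (l.length - (pvLastB l).toNat - 1) + 1 by simp; omega,
          List.replicate_succ']
        simp [List.append_assoc]
    · rw [show (l ++ [c]).length = l.length + 1 by simp, pvLoopA,
        List.getElem?_concat_length]
      simp only [if_pos hA]
      have hset : (l ++ [c]).set l.length (Char.ofNat (c.toNat - 1))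
          = l ++ [Char.ofNat (c.toNat - 1)] := by
        rw [List.set_append_right _ _ (le_refl _)]; simp
      rw [hset]
      have hlast : pvLastB (l ++ [c]) = (l.length : Int) := by
        rw [pvLastB_append]; simp [hA]
      unfold pvAltL
      dsimp only
      rw [hlast, if_neg (by simp)]
      rw [show ((l.length : Int)).toNat = l.length by omega,
        List.take_append_of_le_length (le_refl _),
        List.getD_append_right _ _ _ _ (le_refl _)]
      simp

-- ===== VERDICT (by name: the statement is the Claim_ definition above) =====
theorem previous_label_spec : Claim_equal_previous_label := by
  intro s _
  unfold Spec_previous_label previous_label previous_label_alt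
  rw [pvLoopA_eq_altL]
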